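-- pv_equiv track=rewrite | github.com/AmitShanbhoug/ITI-1120 | Assignments/Assignment 3/a3_part1_8677407.py | all_coprime_pairs
-- ===== SOURCE A (Python) =====
-- def coprime(x,y):
--     '''
--     (int,int) -> Boolean
--
--     Returns True if two input integers are coprimes and false otherwise.
--     '''
--
--     a = []
--     b = []
--
--     samefactor = 0
--
--     for i in range(1,x+1):
--
--         if x%i == 0:
--             a.append(i)
--
--     for j in range(1,y+1):
--
--         if y%j == 0:
--             b.append(j)
--
--
--     for c in range(len(a)):
--         for d in range(len(b)):
--
--             if a[c] == b[d]:
--                 samefactor += 1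
--
--     return (samefactor == 1)
--
-- def all_coprime_pairs(L):
--     '''
--     (list) -> list of tuples
--
--     Takes a list of distinct integers and returns a list containing pairs
--     of numbers are tuples.
--     '''
--
--     pairs = []
--
--     for i in range(len(L)):
--         for j in range(i+1,len(L)):
--
--             a,b = L[i],L[j]
--             if coprime(a,b) == True:
--                 pairs.append((a,b))
--
--     return pairs
-- ===== SOURCE B (Python) =====
-- def all_coprime_pairs(L):
--     '''
--     (list) -> list of tuples
--
--     Takes a list of distinct integers and returns a list containing pairs
--     of coprime numbers as tuples.
--     '''
--     pairs = []
--     for i, x in enumerate(L):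
--         for y in L[i + 1:]:
--             if x > 0 and y > 0:
--                 a, b = x, y
--                 while b:
--                     a, b = b, a % b
--                 if a == 1:
--                     pairs.append((x, y))
--     return pairs
-- ===== Notes on version B (the rewrite author's own statement) =====
-- stated objective: faster
-- what changed: Replaces A's per-pair coprime test (enumerate all divisors of both numbers, then a nested quadratic scan counting equal divisors) by the Euclidean gcd algorithm with an explicit positivity guard, run in a single enumerate/slice pair loop.
import Mathlib
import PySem

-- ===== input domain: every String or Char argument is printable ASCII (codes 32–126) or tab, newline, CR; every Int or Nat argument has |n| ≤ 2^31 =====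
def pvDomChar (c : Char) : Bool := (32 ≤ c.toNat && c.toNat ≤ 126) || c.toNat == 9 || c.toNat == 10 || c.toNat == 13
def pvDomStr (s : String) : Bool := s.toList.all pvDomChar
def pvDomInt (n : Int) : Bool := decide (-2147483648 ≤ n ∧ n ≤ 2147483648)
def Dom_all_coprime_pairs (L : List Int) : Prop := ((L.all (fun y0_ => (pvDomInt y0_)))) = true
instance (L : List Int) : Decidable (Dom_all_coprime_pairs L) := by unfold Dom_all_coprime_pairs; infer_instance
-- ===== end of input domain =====

-- B replaces A's per-pair divisor-list enumeration and quadratic common-factor count by the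
-- Euclidean algorithm (with an explicit positivity guard); same return value, far less work per pair.

-- ===== PORT A =====
-- coprime(x, y): build the divisor lists a and b, count equal entries, test count == 1
def pvCoprimeA (x y : Int) : Bool :=
  let a : List Int :=
    (PySem.List.pyRange 1 (x + 1) 1).foldl
      (fun acc i => if PySem.Int.mod x i = 0 then acc ++ [i] else acc) []
  let b : List Int :=
    (PySem.List.pyRange 1 (y + 1) 1).foldl
      (fun acc j => if PySem.Int.mod y j = 0 then acc ++ [j] else acc) []
  let samefactor : Int :=
    (PySem.List.pyRange 0 (a.length : Int) 1).foldl
      (fun s c =>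
        (PySem.List.pyRange 0 (b.length : Int) 1).foldl
          (fun s d =>
            if PySem.List.pyGetD a c 0 = PySem.List.pyGetD b d 0 then s + 1 else s) s) 0
  samefactor == 1

def all_coprime_pairs (L : List Int) : List (Int × Int) :=
  (PySem.List.pyRange 0 (L.length : Int) 1).foldl
    (fun pairs i =>
      (PySem.List.pyRange (i + 1) (L.length : Int) 1).foldl
        (fun pairs j =>
          let a := PySem.List.pyGetD L i 0
          let b := PySem.List.pyGetD L j 0
          if pvCoprimeA a b = true then pairs ++ [(a, b)] else pairs) pairs) []

-- ===== PORT B =====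
-- termination measure for the Euclidean loop (cited by pvGcd's decreasing_by)
theorem pvMod_natAbs_lt (a b : Int) (hb : b ≠ 0) :
    (PySem.Int.mod a b).natAbs < b.natAbs := by
  rcases lt_or_gt_of_ne hb with h | h
  · have := PySem.Int.mod_neg_bounds (a := a) h
    omega
  · have h1 := PySem.Int.mod_nonneg (a := a) h
    have h2 := PySem.Int.mod_lt (a := a) h
    omega

-- while b: a, b = b, a % b
def pvGcd (a b : Int) : Int :=
  if h : b = 0 then a else pvGcd b (PySem.Int.mod a b)
termination_by b.natAbs
decreasing_by exact pvMod_natAbs_lt a b h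

def all_coprime_pairs_alt (L : List Int) : List (Int × Int) :=
  (PySem.List.enumerate L 0).foldl
    (fun pairs p =>
      (PySem.List.slice L (some (p.1 + 1)) none).foldl
        (fun pairs y =>
          if p.2 > 0 && y > 0 then
            (if pvGcd p.2 y = 1 then pairs ++ [(p.2, y)] else pairs)
          else pairs) pairs) []

-- ===== PRECONDITION & SPEC =====
def Spec_all_coprime_pairs (L : List Int) (out : List (Int × Int)) : Prop := out = all_coprime_pairs_alt L
instance (L : List Int) (out : List (Int × Int)) : Decidable (Spec_all_coprime_pairs L out) := by unfold Spec_all_coprime_pairs; infer_instance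

-- ===== CLAIM (what is proved, stated in full; the proofs are below) =====
def Claim_equal_all_coprime_pairs : Prop := ∀ (L : List Int), Dom_all_coprime_pairs L → Spec_all_coprime_pairs L (all_coprime_pairs L)

-- ===== LEMMAS AND PROOFS =====

-- the list A's first two loops build: positive divisors of x in increasing order
def pvDivs (x : Int) : List Int :=
  (PySem.List.pyRange 1 (x + 1) 1).filter (fun i => decide (PySem.Int.mod x i = 0))

theorem nodup_pvDivs (x : Int) : (pvDivs x).Nodup :=
  (PySem.List.nodup_pyRange_one 1 (x + 1)).filter _

theorem mem_pvDivs {x c : Int} (hx : 0 < x) : c ∈ pvDivs x ↔ 1 ≤ c ∧ c ∣ x := by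
  unfold pvDivs
  simp only [List.mem_filter, PySem.List.mem_pyRange_one, decide_eq_true_eq,
    PySem.Int.mod_eq_zero_iff_dvd]
  constructor
  · rintro ⟨⟨h1, _⟩, h3⟩; exact ⟨h1, h3⟩
  · rintro ⟨h1, h2⟩; exact ⟨⟨h1, by have := Int.le_of_dvd hx h2; omega⟩, h2⟩

theorem pvDivs_nonpos {x : Int} (hx : x ≤ 0) : pvDivs x = [] := by
  unfold pvDivs
  rw [PySem.List.pyRange_one_eq_nil (by omega)]
  rfl

-- A's samefactor counter counts the common divisors
theorem pvCoprimeA_eq_count (x y : Int) :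
    pvCoprimeA x y = ((((pvDivs x).countP (fun c => decide (c ∈ pvDivs y))) : Int) == 1) := by
  unfold pvCoprimeA
  rw [PySem.List.foldl_append_ite_eq_filter, PySem.List.foldl_append_ite_eq_filter]
  simp only [List.nil_append]
  rw [show ((PySem.List.pyRange 1 (x + 1) 1).filter (fun i => decide (PySem.Int.mod x i = 0))) = pvDivs x from rfl]
  rw [show ((PySem.List.pyRange 1 (y + 1) 1).filter (fun j => decide (PySem.Int.mod y j = 0))) = pvDivs y from rfl]
  have hout :
      List.foldl
        (fun s c => List.foldl
          (fun s d => if PySem.List.pyGetD (pvDivs x) c 0 = PySem.List.pyGetD (pvDivs y) d 0 then s + 1 else s)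
          s (PySem.List.pyRange 0 ((pvDivs y).length : Int) 1))
        (0 : Int) (PySem.List.pyRange 0 ((pvDivs x).length : Int) 1)
      = List.foldl
        (fun s v => List.foldl
          (fun s d => if v = PySem.List.pyGetD (pvDivs y) d 0 then s + 1 else s)
          s (PySem.List.pyRange 0 ((pvDivs y).length : Int) 1))
        (0 : Int) (pvDivs x) :=
    PySem.List.foldl_pyRange_zero_pyGetD' (pvDivs x) 0
      (fun (s : Int) v => List.foldl
        (fun s d => if v = PySem.List.pyGetD (pvDivs y) d 0 then s + 1 else s)
        s (PySem.List.pyRange 0 ((pvDivs y).length : Int) 1)) 0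
  congr 1
  refine hout.trans ?_
  have hin : ∀ (v : Int) (s : Int),
      List.foldl (fun s d => if v = PySem.List.pyGetD (pvDivs y) d 0 then s + 1 else s)
        s (PySem.List.pyRange 0 ((pvDivs y).length : Int) 1)
      = List.foldl (fun s w => if v = w then s + 1 else s) s (pvDivs y) :=
    fun v s => PySem.List.foldl_pyRange_zero_pyGetD' (pvDivs y) 0
      (fun (s : Int) w => if v = w then s + 1 else s) s
  simp only [hin]
  have hinner : ∀ (c : Int) (s : Int),
      (pvDivs y).foldl (fun s w => if c = w then s + 1 else s) s
      = s + ((pvDivs y).countP (fun w => decide (c = w)) : Int) := by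
    intro c s
    rw [show (fun (s : Int) (w : Int) => if c = w then s + 1 else s)
        = (fun s w => if (fun w => decide (c = w)) w = true then s + 1 else s) from by
      funext s w; by_cases h : c = w <;> simp [h]]
    exact PySem.List.foldl_count_if _ _ _
  simp only [hinner]
  rw [PySem.List.foldl_add (pvDivs x) (fun c => (((pvDivs y).countP (fun w => decide (c = w))) : Int)) 0]
  have hcount : ∀ c : Int, (pvDivs y).countP (fun w => decide (c = w))
      = (if c ∈ pvDivs y then 1 else 0) := by
    intro c
    rw [List.countP_congr (fun w _ => by
      simp only [decide_eq_true_eq, beq_iff_eq]; exact eq_comm :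
      ∀ w ∈ pvDivs y, decide (c = w) = true ↔ (w == c) = true)]
    by_cases h : c ∈ pvDivs y
    · rw [if_pos h]; exact List.count_eq_one_of_mem (nodup_pvDivs y) h
    · rw [if_neg h]; exact List.count_eq_zero_of_not_mem h
  rw [show (fun c => (((pvDivs y).countP (fun w => decide (c = w))) : Int))
      = (fun c => if (fun c => decide (c ∈ pvDivs y)) c = true then (1 : Int) else 0) from by
    funext c; rw [hcount]; by_cases h : c ∈ pvDivs y <;> simp [h]]
  rw [PySem.List.sum_map_ite_one_zero]
  omega

theorem pvGcd_eq_gcd (b a : Int) (ha : 0 ≤ a) (hb : 0 ≤ b) :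
    pvGcd a b = (Int.gcd a b : Int) := by
  rw [pvGcd]
  split_ifs with h
  · subst h
    simp [Int.gcd, Int.natAbs_of_nonneg ha]
  · have hbpos : 0 < b := lt_of_le_of_ne hb (Ne.symm h)
    have hmod := PySem.Int.mod_eq_emod_of_pos (a := a) hbpos
    have ih := pvGcd_eq_gcd (PySem.Int.mod a b) b hb
      (by rw [hmod]; exact Int.emod_nonneg a (by omega))
    rw [ih, hmod, Int.gcd_comm, Int.gcd_emod]
termination_by b.natAbs
decreasing_by exact pvMod_natAbs_lt a b h

theorem count_common_eq_one_iff {x y : Int} (hx : 0 < x) (hy : 0 < y) :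
    (pvDivs x).countP (fun c => decide (c ∈ pvDivs y)) = 1 ↔ Int.gcd x y = 1 := by
  rw [List.countP_eq_length_filter]
  set common := (pvDivs x).filter (fun c => decide (c ∈ pvDivs y)) with hc
  have hmem : ∀ c : Int, c ∈ common ↔ 1 ≤ c ∧ c ∣ x ∧ c ∣ y := by
    intro c
    simp only [hc, List.mem_filter, decide_eq_true_eq, mem_pvDivs hx, mem_pvDivs hy]
    tauto
  have hone : (1 : Int) ∈ common := (hmem 1).2 ⟨le_refl 1, one_dvd x, one_dvd y⟩
  have hnd : common.Nodup := (nodup_pvDivs x).filter _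
  constructor
  · intro hlen
    obtain ⟨u, hu⟩ := List.length_eq_one_iff.1 hlen
    have hgmem : ((Int.gcd x y : Nat) : Int) ∈ common := by
      rw [hmem]
      refine ⟨by exact_mod_cast Int.gcd_pos_iff.2 (Or.inl (by omega)), Int.gcd_dvd_left x y, Int.gcd_dvd_right x y⟩
    rw [hu] at hone hgmem
    simp only [List.mem_singleton] at hone hgmem
    omega
  · intro hg
    have hall : ∀ c ∈ common, c = 1 := by
      intro c hcm
      obtain ⟨h1, h2, h3⟩ := (hmem c).1 hcm
      have hcn : c = ((c.toNat : Nat) : Int) := by omega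
      have : (c.toNat : Int) ∣ (Int.gcd x y : Int) := by
        exact_mod_cast Int.dvd_gcd (by rw [← hcn]; exact h2) (by rw [← hcn]; exact h3)
      have hgc : ((Int.gcd x y : Nat) : Int) = 1 := by exact_mod_cast hg
      rw [hgc] at this
      have h5 : (c.toNat : Int) = 1 := Int.eq_one_of_dvd_one (by omega) this
      omega
    have hrep := List.eq_replicate_of_mem hall
    have hle : common.length ≤ 1 := List.nodup_replicate.1 (hrep ▸ hnd)
    have hpos : 0 < common.length := List.length_pos_of_mem hone
    omega

-- the predicate A tests equals the predicate B tests
theorem pvCoprimeA_iff (x y : Int) :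
    pvCoprimeA x y = true ↔ 0 < x ∧ 0 < y ∧ pvGcd x y = 1 := by
  rw [pvCoprimeA_eq_count]
  by_cases hx : 0 < x
  · by_cases hy : 0 < y
    · rw [beq_iff_eq, pvGcd_eq_gcd y x (by omega) (by omega)]
      have := count_common_eq_one_iff hx hy
      constructor
      · intro h
        refine ⟨hx, hy, ?_⟩
        have : Int.gcd x y = 1 := this.1 (by exact_mod_cast h)
        exact_mod_cast this
      · rintro ⟨-, -, h⟩
        have : Int.gcd x y = 1 := by exact_mod_cast h
        exact_mod_cast (count_common_eq_one_iff hx hy).2 this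
    · have : pvDivs y = [] := pvDivs_nonpos (by omega)
      simp [this]
      omega
  · have : pvDivs x = [] := pvDivs_nonpos (by omega)
    simp [this]
    omega

theorem pv_main (L : List Int) : all_coprime_pairs L = all_coprime_pairs_alt L := by
  unfold all_coprime_pairs all_coprime_pairs_alt
  rw [PySem.List.enumerate_eq_map_pyRange L 0, List.foldl_map]
  simp only [PySem.List.len]
  apply PySem.List.foldl_congr_mem
  intro pairs i hi
  have hi0 : 0 ≤ i := (PySem.List.mem_pyRange_one.1 hi).1
  rw [PySem.List.foldl_pyRange_pyGetD' L 0
    (fun pairs b => if pvCoprimeA (PySem.List.pyGetD L i 0) b = true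
      then pairs ++ [(PySem.List.pyGetD L i 0, b)] else pairs) pairs (by omega : (0:Int) ≤ i + 1)]
  rw [PySem.List.slice_from L (by omega : (0:Int) ≤ i + 1)]
  apply PySem.List.foldl_congr_mem
  intro acc y _
  set xv := PySem.List.pyGetD L i 0 with hxv
  by_cases h : 0 < xv ∧ 0 < y ∧ pvGcd xv y = 1
  · rw [if_pos ((pvCoprimeA_iff xv y).2 h)]
    obtain ⟨h1, h2, h3⟩ := h
    simp [h1, h2, h3]
  · rw [if_neg (by rw [pvCoprimeA_iff]; exact h)]
    by_cases h1 : 0 < xv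
    · by_cases h2 : 0 < y
      · have h3 : ¬ pvGcd xv y = 1 := fun hh => h ⟨h1, h2, hh⟩
        simp [h1, h2, h3]
      · simp [h2]
    · simp [h1]

-- ===== VERDICT (by name: the statement is the Claim_ definition above) =====
theorem all_coprime_pairs_spec : Claim_equal_all_coprime_pairs := by
  intro L _
  unfold Spec_all_coprime_pairs
  exact pv_main L
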